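-- pv_equiv track=rewrite | github.com/vbscharan/DSA | Number and the Digit Sum - GFG/number-and-the-digit-sum.py | numberCount
-- ===== SOURCE A (Python) =====
-- def numberCount(n,k):
-- # code here
--     l=1;h=n
--     while l<=h:
--         mid=(l+h)//2
--         c=0
--         while mid>0:
--             c+=mid%10
--             mid=mid//10
--         mid=(l+h)//2
--         if abs(mid-c)>=k:
--             h=mid-1
--         else:
--             l=mid+1
--     return n-h
-- ===== SOURCE B (Python) =====
-- def numberCount(n, k):
--     # smallest x with x - digitsum(x) >= k lies in [lo, lo + 99]
--     lo = k if k > 1 else 1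
--     first = lo + 99
--     for x in range(lo, lo + 99):
--         s = 0
--         m = x
--         while m > 0:
--             s += m % 10
--             m //= 10
--         if x - s >= k:
--             first = x
--             break
--     return n - first + 1 if first <= n else 0
-- ===== Notes on version B (the rewrite author's own statement) =====
-- stated objective: alternative
-- what changed: Replaced the binary search over [1,n] by a bounded forward scan of at most 99 candidates starting at max(k,1) for the first x with x - digitsum(x) >= k (digit sums of 32-bit ints are at most 90), followed by the closed-form count n - first + 1.
import Mathlib
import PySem

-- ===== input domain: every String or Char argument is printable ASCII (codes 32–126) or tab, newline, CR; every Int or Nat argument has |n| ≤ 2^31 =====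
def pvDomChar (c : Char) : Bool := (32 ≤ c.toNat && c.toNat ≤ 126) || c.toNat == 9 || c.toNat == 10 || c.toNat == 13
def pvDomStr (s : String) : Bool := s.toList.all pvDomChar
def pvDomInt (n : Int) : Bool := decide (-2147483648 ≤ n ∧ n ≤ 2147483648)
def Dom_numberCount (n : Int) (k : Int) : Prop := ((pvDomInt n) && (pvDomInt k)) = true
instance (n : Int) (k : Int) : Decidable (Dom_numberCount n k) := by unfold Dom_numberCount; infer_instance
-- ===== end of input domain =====

-- B replaces A's binary search over [1,n] by a bounded forward scan from max(k,1) for the first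
-- x with x - digitsum(x) >= k, then a closed-form count (objective: alternative algorithm; measured speed comparable).

-- ===== PORT A =====
-- inner 'while mid>0: c+=mid%10; mid=mid//10'
def pvDigitLoopA (mid : Int) (c : Int) : Int :=
  if _h : mid > 0 then pvDigitLoopA (PySem.Int.floordiv mid 10) (c + PySem.Int.mod mid 10)
  else c
termination_by mid.toNat
decreasing_by
  rw [PySem.Int.floordiv_eq_ediv_of_pos (by omega)]
  omega

-- outer 'while l<=h: …'
def pvALoopA (n k l h : Int) : Int :=
  if _h : l ≤ h then
    let mid := PySem.Int.floordiv (l + h) 2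
    let c := pvDigitLoopA mid 0
    if |mid - c| ≥ k then pvALoopA n k l (mid - 1)
    else pvALoopA n k (mid + 1) h
  else n - h
termination_by (h + 1 - l).toNat
decreasing_by
  · have := PySem.Int.floordiv_two_mid_bounds (lo := l) (hi := h) _h
    omega
  · have := PySem.Int.floordiv_two_mid_bounds (lo := l) (hi := h) _h
    omega

def numberCount (n : Int) (k : Int) : Int := pvALoopA n k 1 n

-- ===== PORT B =====
-- inner 'while m>0: s+=m%10; m//=10'
def pvDigitLoopB (m : Int) (s : Int) : Int :=
  if _h : m > 0 then pvDigitLoopB (PySem.Int.floordiv m 10) (s + PySem.Int.mod m 10)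
  else s
termination_by m.toNat
decreasing_by
  rw [PySem.Int.floordiv_eq_ediv_of_pos (by omega)]
  omega

-- 'for x in range(lo, lo+99): … if x - s >= k: first = x; break' — first hit, else the default
def pvScanB (k : Int) : List Int → Int → Int
  | [], first => first
  | x :: xs, first => if x - pvDigitLoopB x 0 ≥ k then x else pvScanB k xs first

def numberCount_alt (n : Int) (k : Int) : Int :=
  let lo := if k > 1 then k else 1
  let first := pvScanB k (PySem.List.pyRange lo (lo + 99) 1) (lo + 99)
  if first ≤ n then n - first + 1 else 0

-- ===== PRECONDITION & SPEC =====
def Spec_numberCount (n : Int) (k : Int) (out : Int) : Prop := out = numberCount_alt n k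
instance (n : Int) (k : Int) (out : Int) : Decidable (Spec_numberCount n k out) := by unfold Spec_numberCount; infer_instance

-- ===== CLAIM (what is proved, stated in full; the proofs are below) =====
def Claim_equal_numberCount : Prop := ∀ (n : Int) (k : Int), Dom_numberCount n k → Spec_numberCount n k (numberCount n k)

-- ===== LEMMAS AND PROOFS =====

theorem pvDigitLoopB_eq (m s : Int) : pvDigitLoopB m s = pvDigitLoopA m s := by
  by_cases h : m > 0
  · rw [pvDigitLoopB, pvDigitLoopA, dif_pos h, dif_pos h,
      pvDigitLoopB_eq (PySem.Int.floordiv m 10) (s + PySem.Int.mod m 10)]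
  · rw [pvDigitLoopB, pvDigitLoopA, dif_neg h, dif_neg h]
termination_by m.toNat
decreasing_by
  rw [PySem.Int.floordiv_eq_ediv_of_pos (by omega)]
  omega

-- digit sum of m (A's inner loop with accumulator 0)
def pvDS (m : Int) : Int := pvDigitLoopA m 0

theorem pvDigitLoopA_add (m c : Int) : pvDigitLoopA m c = c + pvDS m := by
  by_cases h : m > 0
  · rw [pvDS]
    conv_lhs => rw [pvDigitLoopA]
    conv_rhs => rw [pvDigitLoopA]
    rw [dif_pos h, dif_pos h,
      pvDigitLoopA_add (PySem.Int.floordiv m 10) (c + PySem.Int.mod m 10),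
      pvDigitLoopA_add (PySem.Int.floordiv m 10) (0 + PySem.Int.mod m 10)]
    ring
  · rw [pvDS]
    conv_lhs => rw [pvDigitLoopA]
    conv_rhs => rw [pvDigitLoopA]
    rw [dif_neg h, dif_neg h]
    ring
termination_by m.toNat
decreasing_by
  all_goals rw [PySem.Int.floordiv_eq_ediv_of_pos (by omega)]; omega

lemma pvDS_pos (m : Int) (h : m > 0) :
    pvDS m = PySem.Int.mod m 10 + pvDS (PySem.Int.floordiv m 10) := by
  rw [pvDS, pvDigitLoopA, dif_pos h, pvDigitLoopA_add]
  ring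

lemma pvDS_nonpos (m : Int) (h : ¬ m > 0) : pvDS m = 0 := by
  rw [pvDS, pvDigitLoopA, dif_neg h]

theorem pvDS_bounds (m : Int) (hm : 0 ≤ m) : 0 ≤ pvDS m ∧ pvDS m ≤ m := by
  by_cases h : m > 0
  · have hq := PySem.Int.floordiv_mul_add_mod m 10
    have hr0 := PySem.Int.mod_nonneg m (b := 10) (by omega)
    have hrlt := PySem.Int.mod_lt m (b := 10) (by omega)
    have hdiv : 0 ≤ PySem.Int.floordiv m 10 := by nlinarith
    have ih := pvDS_bounds (PySem.Int.floordiv m 10) hdiv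
    rw [pvDS_pos m h]
    constructor <;> nlinarith [ih.1, ih.2]
  · rw [pvDS_nonpos m h]
    omega
termination_by m.toNat
decreasing_by
  rw [PySem.Int.floordiv_eq_ediv_of_pos (by omega)]
  omega

-- ds (m+1) ≤ ds m + 1 for m ≥ 0
theorem pvDS_succ_le (m : Int) (hm : 0 ≤ m) : pvDS (m + 1) ≤ pvDS m + 1 := by
  by_cases h : m > 0
  · have hq := PySem.Int.floordiv_mul_add_mod m 10
    have hr0 := PySem.Int.mod_nonneg m (b := 10) (by omega)
    have hrlt := PySem.Int.mod_lt m (b := 10) (by omega)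
    have hdiv : 0 ≤ PySem.Int.floordiv m 10 := by nlinarith
    have hsm := pvDS_pos m h
    have hsm1 := pvDS_pos (m + 1) (by omega)
    by_cases h9 : PySem.Int.mod m 10 = 9
    · -- carry: (m+1) % 10 = 0, (m+1) // 10 = m//10 + 1
      have hdv : PySem.Int.floordiv (m + 1) 10 = PySem.Int.floordiv m 10 + 1 := by
        rw [PySem.Int.floordiv_eq_iff_of_pos (by omega)]
        omega
      have hmod1 : PySem.Int.mod (m + 1) 10 = 0 := by
        have := PySem.Int.floordiv_mul_add_mod (m + 1) 10
        omega
      have hrec := pvDS_succ_le (PySem.Int.floordiv m 10) hdiv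
      have hnn := (pvDS_bounds (PySem.Int.floordiv m 10) hdiv).1
      rw [hsm1, hmod1, hdv]
      rw [hsm, h9]
      omega
    · -- no carry: (m+1)%10 = m%10 + 1, (m+1)//10 = m//10
      have hdv : PySem.Int.floordiv (m + 1) 10 = PySem.Int.floordiv m 10 := by
        rw [PySem.Int.floordiv_eq_iff_of_pos (by omega)]
        omega
      have hmod1 : PySem.Int.mod (m + 1) 10 = PySem.Int.mod m 10 + 1 := by
        have := PySem.Int.floordiv_mul_add_mod (m + 1) 10
        omega
      rw [hsm1, hmod1, hdv, hsm]
      omega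
  · -- m = 0
    have hm0 : m = 0 := by omega
    subst hm0
    have h1 : pvDS 1 = PySem.Int.mod 1 10 + pvDS (PySem.Int.floordiv 1 10) := pvDS_pos 1 (by omega)
    have h2 : PySem.Int.floordiv 1 10 = 0 := by decide
    have h3 : PySem.Int.mod 1 10 = 1 := by decide
    have h4 : pvDS 0 = 0 := pvDS_nonpos 0 (by omega)
    rw [zero_add, h1, h2, h3, h4]
    omega
termination_by m.toNat
decreasing_by
  rw [PySem.Int.floordiv_eq_ediv_of_pos (by omega)]
  omega

-- x - ds x is monotone on nonnegative x
lemma pvF_mono (x y : Int) (hx : 0 ≤ x) (hxy : x ≤ y) :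
    x - pvDS x ≤ y - pvDS y := by
  have key : ∀ d : Nat, ∀ x : Int, 0 ≤ x → x - pvDS x ≤ (x + d) - pvDS (x + d) := by
    intro d
    induction d with
    | zero => intro x _; simp
    | succ d ih =>
      intro x hx
      have h1 := ih x hx
      have h2 := pvDS_succ_le (x + d) (by positivity)
      have hc : ((d + 1 : Nat) : Int) = (d : Int) + 1 := by push_cast; ring
      rw [hc, ← add_assoc]
      omega
  obtain ⟨d, rfl⟩ : ∃ d : Nat, y = x + d := ⟨(y - x).toNat, by omega⟩
  exact key d x hx

-- digit sums are at least 1 on positive numbers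
theorem pvDS_ge_one (m : Int) (h : 0 < m) : 1 ≤ pvDS m := by
  have hq := PySem.Int.floordiv_mul_add_mod m 10
  have hr0 := PySem.Int.mod_nonneg m (b := 10) (by omega)
  have hrlt := PySem.Int.mod_lt m (b := 10) (by omega)
  have hdiv : 0 ≤ PySem.Int.floordiv m 10 := by nlinarith
  rw [pvDS_pos m h]
  by_cases hr : 1 ≤ PySem.Int.mod m 10
  · have := (pvDS_bounds (PySem.Int.floordiv m 10) hdiv).1
    omega
  · have hqpos : 0 < PySem.Int.floordiv m 10 := by omega
    have := pvDS_ge_one (PySem.Int.floordiv m 10) hqpos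
    omega
termination_by m.toNat
decreasing_by
  rw [PySem.Int.floordiv_eq_ediv_of_pos (by omega)]
  omega

-- digit sums are at most 9 per digit
lemma pvDS_pow (d : Nat) : ∀ m : Int, 0 ≤ m → m < 10 ^ d → pvDS m ≤ 9 * d := by
  induction d with
  | zero =>
    intro m h0 hlt
    have hm : m = 0 := by omega
    subst hm
    rw [pvDS_nonpos 0 (by omega)]
    simp
  | succ d ih =>
    intro m h0 hlt
    by_cases h : m > 0
    · have hq := PySem.Int.floordiv_mul_add_mod m 10
      have hr0 := PySem.Int.mod_nonneg m (b := 10) (by omega)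
      have hrlt := PySem.Int.mod_lt m (b := 10) (by omega)
      have hdiv : 0 ≤ PySem.Int.floordiv m 10 := by nlinarith
      have hpow : (10 : Int) ^ (d + 1) = 10 ^ d * 10 := by ring
      rw [hpow] at hlt
      have hqlt : PySem.Int.floordiv m 10 < 10 ^ d := by omega
      have := ih (PySem.Int.floordiv m 10) hdiv hqlt
      rw [pvDS_pos m h]
      push_cast
      omega
    · rw [pvDS_nonpos m h]
      positivity

-- the scan over range(a, b) finds the first qualifying element, else returns the default
lemma pvScan_spec (k a b d : Int) (hab : a ≤ b) (hbd : b ≤ d) :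
    (a ≤ pvScanB k (PySem.List.pyRange a b 1) d ∧ pvScanB k (PySem.List.pyRange a b 1) d ≤ d) ∧
    (∀ y, a ≤ y → y < pvScanB k (PySem.List.pyRange a b 1) d → y < b → ¬ (k ≤ y - pvDS y)) ∧
    (pvScanB k (PySem.List.pyRange a b 1) d < b → k ≤ pvScanB k (PySem.List.pyRange a b 1) d - pvDS (pvScanB k (PySem.List.pyRange a b 1) d)) := by
  by_cases heq : a = b
  · subst heq
    rw [PySem.List.pyRange_one_eq_nil le_rfl]
    exact ⟨⟨by simpa [pvScanB] using hbd, by simp [pvScanB]⟩,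
      fun y hy1 hy2 hy3 => by omega,
      fun hlt => by simp [pvScanB] at hlt; omega⟩
  · have hltab : a < b := by omega
    rw [PySem.List.pyRange_one_cons hltab]
    simp only [pvScanB]
    split
    · rename_i hPa
      rw [pvDigitLoopB_eq, show pvDigitLoopA a 0 = pvDS a from rfl] at hPa
      exact ⟨⟨le_rfl, by omega⟩, fun y hy1 hy2 _ => by omega, fun _ => hPa⟩
    · rename_i hPa
      rw [pvDigitLoopB_eq, show pvDigitLoopA a 0 = pvDS a from rfl] at hPa
      obtain ⟨⟨hb1, hb2⟩, hmid, hhit⟩ := pvScan_spec k (a + 1) b d (by omega) hbd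
      refine ⟨⟨by omega, hb2⟩, ?_, hhit⟩
      intro y hy1 hy2 hy3
      by_cases hya : y = a
      · subst hya; exact hPa
      · exact hmid y (by omega) hy2 hy3
termination_by (b - a).toNat
decreasing_by omega

-- characterisation of B's 'first': it qualifies and everything below it fails (needs k ≤ 2^31)
lemma pvFirst_char (k : Int) (hk : k ≤ 2147483648) :
    1 ≤ pvScanB k (PySem.List.pyRange (if k > 1 then k else 1) ((if k > 1 then k else 1) + 99) 1) ((if k > 1 then k else 1) + 99) ∧
    k ≤ pvScanB k (PySem.List.pyRange (if k > 1 then k else 1) ((if k > 1 then k else 1) + 99) 1) ((if k > 1 then k else 1) + 99) -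
      pvDS (pvScanB k (PySem.List.pyRange (if k > 1 then k else 1) ((if k > 1 then k else 1) + 99) 1) ((if k > 1 then k else 1) + 99)) ∧
    ∀ y, 1 ≤ y → y < pvScanB k (PySem.List.pyRange (if k > 1 then k else 1) ((if k > 1 then k else 1) + 99) 1) ((if k > 1 then k else 1) + 99) →
      ¬ (k ≤ y - pvDS y) := by
  set lo := if k > 1 then k else 1 with hlo
  have hlo1 : 1 ≤ lo := by rw [hlo]; split <;> omega
  have hlok : k ≤ lo := by rw [hlo]; split <;> omega
  have hlobnd : lo ≤ 2147483648 := by rw [hlo]; split <;> omega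
  obtain ⟨⟨hb1, hb2⟩, hmid, hhit⟩ := pvScan_spec k lo (lo + 99) (lo + 99) (by omega) le_rfl
  set f := pvScanB k (PySem.List.pyRange lo (lo + 99) 1) (lo + 99) with hf
  have hPf : k ≤ f - pvDS f := by
    by_cases hflt : f < lo + 99
    · exact hhit hflt
    · have hfeq : f = lo + 99 := by omega
      have hds : pvDS f ≤ 90 := by
        have := pvDS_pow 10 f (by omega) (by rw [hfeq]; norm_num; omega)
        omega
      omega
  refine ⟨by omega, hPf, ?_⟩
  intro y hy1 hy2
  by_cases hylo : y < lo
  · -- below lo: lo = k and every positive y has digit sum ≥ 1, so y - ds y ≤ y - 1 < k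
    have hds1 := pvDS_ge_one y (by omega)
    have : lo = k := by rw [hlo]; split <;> omega
    omega
  · exact hmid y (by omega) hy2 (by omega)

-- B's value, with the lets zeta-reduced
lemma pvAlt_def (n k : Int) :
    numberCount_alt n k =
      if pvScanB k (PySem.List.pyRange (if k > 1 then k else 1) ((if k > 1 then k else 1) + 99) 1) ((if k > 1 then k else 1) + 99) ≤ n
      then n - pvScanB k (PySem.List.pyRange (if k > 1 then k else 1) ((if k > 1 then k else 1) + 99) 1) ((if k > 1 then k else 1) + 99) + 1
      else 0 := rfl

-- one unfolding step of A's loop in the l ≤ h case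
lemma pvALoopA_step (n k l h : Int) (hle : l ≤ h) :
    pvALoopA n k l h =
      if |PySem.Int.floordiv (l + h) 2 - pvDigitLoopA (PySem.Int.floordiv (l + h) 2) 0| ≥ k
      then pvALoopA n k l (PySem.Int.floordiv (l + h) 2 - 1)
      else pvALoopA n k (PySem.Int.floordiv (l + h) 2 + 1) h := by
  rw [pvALoopA, dif_pos hle]

-- binary-search invariant: A's loop lands on the closed-form count from 'first'
theorem pvALoop_eq (n k l h first : Int) (hl1 : 1 ≤ l) (hlh : l ≤ h + 1) (hhn : h ≤ n)
    (hf1 : 1 ≤ first) (hPf : k ≤ first - pvDS first)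
    (hmin : ∀ y, 1 ≤ y → y < first → ¬ (k ≤ y - pvDS y))
    (hlow : ∀ x, 1 ≤ x → x < l → ¬ (k ≤ x - pvDS x))
    (hhigh : ∀ x, h < x → x ≤ n → k ≤ x - pvDS x) :
    pvALoopA n k l h = if first ≤ n then n - first + 1 else 0 := by
  by_cases hle : l ≤ h
  · have hb := PySem.Int.floordiv_two_mid_bounds (lo := l) (hi := h) hle
    set mid := PySem.Int.floordiv (l + h) 2 with hmiddef
    have hds := pvDS_bounds mid (by omega)
    have habs : |mid - pvDigitLoopA mid 0| = mid - pvDS mid := by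
      rw [show pvDigitLoopA mid 0 = pvDS mid from rfl, abs_of_nonneg (by omega)]
    rw [pvALoopA_step n k l h hle, ← hmiddef, habs]
    split
    · -- P mid holds: h := mid - 1
      rename_i hP
      refine pvALoop_eq n k l (mid - 1) first hl1 (by omega) (by omega) hf1 hPf hmin hlow ?_
      intro x hx hxn
      have := pvF_mono mid x (by omega) (by omega)
      omega
    · -- ¬ P mid: l := mid + 1
      rename_i hP
      refine pvALoop_eq n k (mid + 1) h first (by omega) (by omega) hhn hf1 hPf hmin ?_ hhigh
      intro x hx1 hxlt hkx
      apply hP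
      have := pvF_mono x mid (by omega) (by omega)
      omega
  · rw [pvALoopA, dif_neg hle]
    have hlh' : l = h + 1 := by omega
    by_cases hc : h < n
    · -- h+1 ∈ [1,n] qualifies, everything below l = h+1 fails, so first = h+1
      have hq : k ≤ (h + 1) - pvDS (h + 1) := hhigh (h + 1) (by omega) (by omega)
      have h1 : first ≤ h + 1 := by
        by_contra hcon
        exact (hmin (h + 1) (by omega) (by omega)) hq
      have h2 : ¬ first < h + 1 := fun hflt => (hlow first hf1 (by omega)) hPf
      rw [if_pos (by omega)]
      omega
    · -- h = n: nothing in [1,n] qualifies, so first > n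
      have hfn : ¬ first ≤ n := fun hfle => (hlow first hf1 (by omega)) hPf
      rw [if_neg hfn]
      omega
termination_by (h + 1 - l).toNat
decreasing_by
  all_goals omega

-- ===== VERDICT (by name: the statement is the Claim_ definition above) =====
theorem numberCount_spec : Claim_equal_numberCount := by
  intro n k hdom
  have hk : k ≤ 2147483648 := by
    unfold Dom_numberCount pvDomInt at hdom
    simp only [Bool.and_eq_true, decide_eq_true_eq] at hdom
    exact hdom.2.2
  unfold Spec_numberCount numberCount
  rw [pvAlt_def]
  obtain ⟨hf1, hPf, hmin⟩ := pvFirst_char k hk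
  set first := pvScanB k (PySem.List.pyRange (if k > 1 then k else 1) ((if k > 1 then k else 1) + 99) 1) ((if k > 1 then k else 1) + 99) with hfdef
  by_cases hn : 1 ≤ n
  · exact pvALoop_eq n k 1 n first (by omega) (by omega) (by omega) hf1 hPf hmin
      (fun x hx1 hx2 => absurd hx1 (by omega))
      (fun x hx hxn => absurd hxn (by omega))
  · rw [pvALoopA, dif_neg (by omega), if_neg (by omega)]
    omega
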